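-- pv_equiv track=rewrite | github.com/huggin/gfg | misc/robots.py | moveRobots
-- ===== SOURCE A (Python) =====
-- def moveRobots(s1, s2):
--     # code here
--     n1 = len(s1)
--     n2 = len(s2)
--     if n1 != n2:
--         return "No"
--
--     i, j = 0, 0
--     while i < n1 and j < n2:
--         while i < n1 and s1[i] == "#":
--             i += 1
--         while j < n2 and s2[j] == "#":
--             j += 1
--         if i == n1 and j == n2:
--             return "Yes"
--         if i == n1 or j == n2:
--             return "No"
--
--         if s1[i] == "A" and s2[j] == "B":
--             return "No"
--         elif s1[i] == "B" and s2[j] == "A":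
--             return "No"
--         elif s1[i] == "A" and i < j:
--             return "No"
--         elif s1[i] == "B" and i > j:
--             return "No"
--         i += 1
--         j += 1
--
--     return "Yes"
-- ===== SOURCE B (Python) =====
-- def _bad(a, i, b, j):
--     # a is a robot char of s1 at position i, b of s2 at position j
--     if a == 'A' and b == 'B':
--         return True
--     if a == 'B' and b == 'A':
--         return True
--     if a == 'A' and i < j:
--         return True
--     if a == 'B' and i > j:
--         return True
--     return False
--
-- def moveRobots(s1, s2):
--     n = len(s1)
--     if n != len(s2):
--         return "No"
--     pend1 = []  # robots of s1 still waiting for their partner in s2: (position, char)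
--     pend2 = []  # robots of s2 still waiting for their partner in s1
--     for t in range(n):
--         a = s1[t]
--         if a != '#':
--             if pend2:
--                 j, c = pend2.pop(0)
--                 if _bad(a, t, c, j):
--                     return "No"
--             else:
--                 pend1.append((t, a))
--         b = s2[t]
--         if b != '#':
--             if pend1:
--                 i, c = pend1.pop(0)
--                 if _bad(c, i, b, t):
--                     return "No"
--             else:
--                 pend2.append((t, b))
--     if pend1 or pend2:
--         return "No"
--     return "Yes"
-- ===== Notes on version B (the rewrite author's own statement) =====
-- stated objective: alternative
-- what changed: Replaces A's two-pointer '#'-skipping scan with an online streaming matcher: one pass over a single index t reads both strings in lockstep, keeps FIFO queues of robots still awaiting a partner on either side, checks each matched pair as soon as its partner arrives, and rejects leftover unmatched robots at the end.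
-- intended difference: When both strings have equal length but different numbers of robots, all common robot pairs pass the four checks, and the side with fewer robots has its last robot at the final string index (e.g. '#A' vs 'AB'), A returns 'Yes' because its loop exits before noticing the leftover robots, while B returns 'No', which is intended since robots cannot appear or disappear. — e.g. on moveRobots("#A", "AB"): A returns "Yes", B returns "No"
import Mathlib
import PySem

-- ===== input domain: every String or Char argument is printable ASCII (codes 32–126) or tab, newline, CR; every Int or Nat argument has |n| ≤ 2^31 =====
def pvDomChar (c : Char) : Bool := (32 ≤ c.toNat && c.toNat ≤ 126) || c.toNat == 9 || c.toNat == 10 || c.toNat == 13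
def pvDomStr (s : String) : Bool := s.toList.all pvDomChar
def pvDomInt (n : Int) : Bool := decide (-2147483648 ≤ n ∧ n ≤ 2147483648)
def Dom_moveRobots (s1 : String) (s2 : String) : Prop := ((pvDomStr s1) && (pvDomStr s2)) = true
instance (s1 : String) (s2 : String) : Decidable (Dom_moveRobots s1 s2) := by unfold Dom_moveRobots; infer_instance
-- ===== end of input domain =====

-- B replaces A's interleaved '#'-skipping two-pointer scan with an online streaming matcher over one
-- index with two pending-robot queues (alternative); on the D_ corner below A returns "Yes" where B
-- intendedly returns "No".

-- ===== PORT A =====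
-- the inner 'while i < n and s[i] == "#": i += 1' loop; fuel ≥ n - i makes the recursion structural
def pvSkip : Nat → List Char → Nat → Nat → Nat
  | 0, _, _, i => i
  | fuel+1, c, n, i => if i < n ∧ c.getD i ' ' = '#' then pvSkip fuel c n (i+1) else i

-- the outer 'while i < n1 and j < n2' loop; fuel ≥ n1 + 1 - i suffices (i grows every iteration)
def pvLoopA : Nat → List Char → List Char → Nat → Nat → Nat → Nat → String
  | 0, _, _, _, _, _, _ => "Yes"
  | fuel+1, c1, c2, n1, n2, i, j =>
    if i < n1 ∧ j < n2 then
      let i' := pvSkip n1 c1 n1 i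
      let j' := pvSkip n2 c2 n2 j
      if i' = n1 ∧ j' = n2 then "Yes"
      else if i' = n1 ∨ j' = n2 then "No"
      else
        let a := c1.getD i' ' '
        let b := c2.getD j' ' '
        if a = 'A' ∧ b = 'B' then "No"
        else if a = 'B' ∧ b = 'A' then "No"
        else if a = 'A' ∧ i' < j' then "No"
        else if a = 'B' ∧ j' < i' then "No"
        else pvLoopA fuel c1 c2 n1 n2 (i'+1) (j'+1)
    else "Yes"

def moveRobots (s1 : String) (s2 : String) : String :=
  let n1 := s1.toList.length
  let n2 := s2.toList.length
  if n1 ≠ n2 then "No"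
  else pvLoopA (n1+1) s1.toList s2.toList n1 n2 0 0

-- ===== PORT B =====
-- B's helper _bad(a, i, b, j)
def pvBad (a : Char) (i : Int) (b : Char) (j : Int) : Bool :=
  if a = 'A' ∧ b = 'B' then true
  else if a = 'B' ∧ b = 'A' then true
  else if a = 'A' ∧ i < j then true
  else if a = 'B' ∧ i > j then true
  else false

-- the "if a != '#'" block of B's loop body: pair with the oldest pending s2-robot or enqueue; none = return "No"
def pvStep1 (a : Char) (t : Int) (p1 p2 : List (Int × Char)) :
    Option (List (Int × Char) × List (Int × Char)) :=
  if a ≠ '#' then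
    match p2 with
    | (j, c) :: rest => if pvBad a t c j then none else some (p1, rest)
    | [] => some (p1 ++ [(t, a)], p2)
  else some (p1, p2)

-- the "if b != '#'" block of B's loop body
def pvStep2 (b : Char) (t : Int) (p1 p2 : List (Int × Char)) :
    Option (List (Int × Char) × List (Int × Char)) :=
  if b ≠ '#' then
    match p1 with
    | (i, c) :: rest => if pvBad c i b t then none else some (rest, p2)
    | [] => some (p1, p2 ++ [(t, b)])
  else some (p1, p2)

-- B's 'for t in range(n)' loop over both strings in lockstep, plus the final leftover check
def pvLoopB : List Char → List Char → Int → List (Int × Char) → List (Int × Char) → String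
  | a :: r1, b :: r2, t, p1, p2 =>
    match pvStep1 a t p1 p2 with
    | none => "No"
    | some (q1, q2) =>
      match pvStep2 b t q1 q2 with
      | none => "No"
      | some (u1, u2) => pvLoopB r1 r2 (t + 1) u1 u2
  | _, _, _, p1, p2 => if p1 = [] ∧ p2 = [] then "Yes" else "No"

def moveRobots_alt (s1 : String) (s2 : String) : String :=
  let n := s1.toList.length
  if n ≠ s2.toList.length then "No"
  else pvLoopB s1.toList s2.toList 0 [] []

-- ===== PRECONDITION & SPEC =====
-- helper: the indexed robots of a string, (char, position) per non-'#' char (input inspection only).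
-- Change region below: on equal-length strings whose robot counts differ, where every common robot pair passes
-- the four checks and the side with fewer robots has its last robot at the final string index,
-- A returns "Yes" (its loop exits before seeing the leftover robots) while B returns "No",
-- the intended answer since robots cannot appear or disappear.
def pvRobs (s : String) := s.toList.zipIdx.filter (·.1 ≠ '#')
def D_moveRobots (s1 : String) (s2 : String) : Prop :=
  let ra := pvRobs s1
  let rb := pvRobs s2
  s1.toList.length = s2.toList.length ∧ ra.length ≠ rb.length ∧
  (if ra.length < rb.length then s1 else s2).toList.getLast? ≠ some '#' ∧
  ∀ x ∈ ra.zip rb,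
    (x.1.1 = 'A' → x.2.1 ≠ 'B' ∧ x.2.2 ≤ x.1.2) ∧ (x.1.1 = 'B' → x.2.1 ≠ 'A' ∧ x.1.2 ≤ x.2.2)

instance (s1 : String) (s2 : String) : Decidable (D_moveRobots s1 s2) := by
  unfold D_moveRobots; infer_instance

def Spec_moveRobots (s1 : String) (s2 : String) (out : String) : Prop :=
  ¬ D_moveRobots s1 s2 → out = moveRobots_alt s1 s2
instance (s1 : String) (s2 : String) (out : String) : Decidable (Spec_moveRobots s1 s2 out) := by
  unfold Spec_moveRobots; infer_instance

def pvDiffWitness_moveRobots : String × String := ("#A", "AB")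
def pvDiffWitnessOut_moveRobots : String × String := ("Yes", "No")

-- ===== CLAIM (what is proved, stated in full; the proofs are below) =====
def Claim_unchanged_moveRobots : Prop := ∀ (s1 : String) (s2 : String), Dom_moveRobots s1 s2 → Spec_moveRobots s1 s2 (moveRobots s1 s2)
def Claim_changed_moveRobots : Prop := Dom_moveRobots (pvDiffWitness_moveRobots.1) (pvDiffWitness_moveRobots.2) ∧ D_moveRobots (pvDiffWitness_moveRobots.1) (pvDiffWitness_moveRobots.2) ∧ moveRobots (pvDiffWitness_moveRobots.1) (pvDiffWitness_moveRobots.2) = pvDiffWitnessOut_moveRobots.1 ∧ moveRobots_alt (pvDiffWitness_moveRobots.1) (pvDiffWitness_moveRobots.2) = pvDiffWitnessOut_moveRobots.2 ∧ pvDiffWitnessOut_moveRobots.1 ≠ pvDiffWitnessOut_moveRobots.2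
def Claim_exact_moveRobots : Prop := ∀ (s1 : String) (s2 : String), Dom_moveRobots s1 s2 → D_moveRobots s1 s2 → moveRobots s1 s2 ≠ moveRobots_alt s1 s2

-- ===== LEMMAS AND PROOFS =====

-- indexed non-'#' characters with Nat positions (proof-side)
def pvRobsN : List Char → Nat → List (Nat × Char)
  | [], _ => []
  | ch :: cs, k => if ch = '#' then pvRobsN cs (k+1) else (k, ch) :: pvRobsN cs (k+1)

def pvRF (c : List Char) (i : Nat) : List (Nat × Char) := pvRobsN (c.drop i) i

-- what A's scan computes once both pointers are inside the strings
def pvAux : List (Nat × Char) → List (Nat × Char) → Nat → Nat → String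
  | [], [], _, _ => "Yes"
  | [], _ :: _, _, _ => "No"
  | _ :: _, [], _, _ => "No"
  | (p, a) :: ra, (q, b) :: rb, n1, n2 =>
    if (a = 'A' ∧ b = 'B') ∨ (a = 'B' ∧ b = 'A') ∨ (a = 'A' ∧ p < q) ∨ (a = 'B' ∧ q < p) then "No"
    else if p + 1 < n1 ∧ q + 1 < n2 then pvAux ra rb n1 n2 else "Yes"

-- the pairwise check over Nat positions
def pvNatZip : List (Nat × Char) → List (Nat × Char) → String
  | [], _ => "Yes"
  | _ :: _, [] => "Yes"
  | (p, a) :: ra, (q, b) :: rb =>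
    if (a = 'A' ∧ b = 'B') ∨ (a = 'B' ∧ b = 'A') ∨ (a = 'A' ∧ p < q) ∨ (a = 'B' ∧ q < p) then "No"
    else pvNatZip ra rb

-- what B's streaming loop computes: the full-pairing check over Int positions
def pvCheckI : List (Int × Char) → List (Int × Char) → String
  | [], [] => "Yes"
  | [], _ :: _ => "No"
  | _ :: _, [] => "No"
  | (i, a) :: ra, (j, b) :: rb => if pvBad a i b j then "No" else pvCheckI ra rb

def pvRobsI (cs : List Char) (t : Nat) : List (Int × Char) :=
  (pvRobsN cs t).map (fun p => ((p.1 : Int), p.2))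

def pvGoodN (x y : Nat × Char) : Prop :=
  ¬((x.2 = 'A' ∧ y.2 = 'B') ∨ (x.2 = 'B' ∧ y.2 = 'A') ∨ (x.2 = 'A' ∧ x.1 < y.1) ∨ (x.2 = 'B' ∧ y.1 < x.1))

def pvDc (ra rb : List (Nat × Char)) (n : Nat) : Prop :=
  (∀ pr ∈ ra.zip rb, pvGoodN pr.1 pr.2) ∧
  ((ra.length < rb.length ∧ ∃ x, ra.getLast? = some x ∧ x.1 + 1 = n) ∨
   (rb.length < ra.length ∧ ∃ x, rb.getLast? = some x ∧ x.1 + 1 = n))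

theorem pvRobsN_mem : ∀ (cs : List Char) (k : Nat) (p : Nat × Char), p ∈ pvRobsN cs k → k ≤ p.1 ∧ p.1 < k + cs.length := by
  intro cs
  induction cs with
  | nil => intro k p hp; simp [pvRobsN] at hp
  | cons ch cs ih =>
    intro k p hp
    simp only [pvRobsN] at hp
    split at hp
    · have := ih (k+1) p hp; simp only [List.length_cons]; omega
    · rcases List.mem_cons.1 hp with h | h
      · subst h
        refine ⟨le_rfl, ?_⟩
        show k < k + (ch :: cs).length
        simp only [List.length_cons]; omega
      · have := ih (k+1) p h; simp only [List.length_cons]; omega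

theorem pvRobsN_pairwise : ∀ (cs : List Char) (k : Nat), (pvRobsN cs k).Pairwise (fun p q => p.1 < q.1) := by
  intro cs
  induction cs with
  | nil => intro k; simp [pvRobsN]
  | cons ch cs ih =>
    intro k
    simp only [pvRobsN]
    split
    · exact ih (k+1)
    · exact List.Pairwise.cons (fun q hq => by have := pvRobsN_mem cs (k+1) q hq; omega) (ih (k+1))

theorem pvRF_nil (c : List Char) (i : Nat) (h : c.length ≤ i) : pvRF c i = [] := by
  simp [pvRF, List.drop_eq_nil_of_le h, pvRobsN]

theorem pvRF_hash (c : List Char) (i : Nat) (h : i < c.length) (hh : c.getD i ' ' = '#') :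
    pvRF c i = pvRF c (i+1) := by
  unfold pvRF
  rw [List.drop_eq_getElem_cons h]
  rw [List.getD_eq_getElem c ' ' h] at hh
  simp [pvRobsN, hh]

theorem pvRF_cons (c : List Char) (i : Nat) (h : i < c.length) (hh : c.getD i ' ' ≠ '#') :
    pvRF c i = (i, c.getD i ' ') :: pvRF c (i+1) := by
  unfold pvRF
  rw [List.drop_eq_getElem_cons h]
  rw [List.getD_eq_getElem c ' ' h] at hh ⊢
  simp [pvRobsN, hh]

theorem pvSkip_spec (c : List Char) : ∀ fuel i, c.length - i ≤ fuel → i ≤ c.length →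
    (pvRF c i = [] ∧ pvSkip fuel c c.length i = c.length) ∨
    (∃ p, pvSkip fuel c c.length i = p ∧ i ≤ p ∧ p < c.length ∧
      pvRF c i = (p, c.getD p ' ') :: pvRF c (p+1)) := by
  intro fuel
  induction fuel with
  | zero =>
    intro i h1 h2
    have h3 : i = c.length := by omega
    subst h3
    exact Or.inl ⟨pvRF_nil c _ le_rfl, rfl⟩
  | succ fuel ih =>
    intro i h1 h2
    by_cases hi : i < c.length
    · by_cases hc : c.getD i ' ' = '#'
      · have hstep : pvSkip (fuel+1) c c.length i = pvSkip fuel c c.length (i+1) := by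
          show (if i < c.length ∧ c.getD i ' ' = '#' then pvSkip fuel c c.length (i+1) else i) = _
          rw [if_pos ⟨hi, hc⟩]
        rw [hstep, pvRF_hash c i hi hc]
        rcases ih (i+1) (by omega) (by omega) with ⟨ha, hb⟩ | ⟨p, h3, h4, h5, h6⟩
        · exact Or.inl ⟨ha, hb⟩
        · exact Or.inr ⟨p, h3, by omega, h5, h6⟩
      · have hstep : pvSkip (fuel+1) c c.length i = i := by
          show (if i < c.length ∧ c.getD i ' ' = '#' then pvSkip fuel c c.length (i+1) else i) = _
          rw [if_neg (fun h => hc h.2)]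
        exact Or.inr ⟨i, hstep, le_rfl, hi, pvRF_cons c i hi hc⟩
    · have h3 : i = c.length := by omega
      subst h3
      refine Or.inl ⟨pvRF_nil c _ le_rfl, ?_⟩
      show (if c.length < c.length ∧ c.getD c.length ' ' = '#' then pvSkip fuel c c.length (c.length+1) else c.length) = _
      rw [if_neg (fun h => absurd h.1 (by omega))]

theorem pvLoopA_eq (c1 c2 : List Char) : ∀ (fuel i j : Nat), c1.length - i < fuel → i ≤ c1.length → j ≤ c2.length →
    pvLoopA fuel c1 c2 c1.length c2.length i j =
      if i < c1.length ∧ j < c2.length then pvAux (pvRF c1 i) (pvRF c2 j) c1.length c2.length else "Yes" := by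
  intro fuel
  induction fuel with
  | zero => intro i j hf _ _; exact absurd hf (by omega)
  | succ fuel ih =>
    intro i j hf hi hj
    by_cases hent : i < c1.length ∧ j < c2.length
    · rw [if_pos hent]
      simp only [pvLoopA]
      rw [if_pos hent]
      rcases pvSkip_spec c1 c1.length i (by omega) hi with ⟨hA0, hA1⟩ | ⟨p, hA1, hip, hpn, hAc⟩ <;>
        rcases pvSkip_spec c2 c2.length j (by omega) hj with ⟨hB0, hB1⟩ | ⟨q, hB1, hjq, hqn, hBc⟩
      · rw [hA1, hB1, if_pos ⟨rfl, rfl⟩, hA0, hB0]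
        rfl
      · rw [hA1, hB1, if_neg (fun h => absurd h.2 (by omega)), if_pos (Or.inl rfl), hA0, hBc]
        rfl
      · rw [hA1, hB1, if_neg (fun h => absurd h.1 (by omega)), if_pos (Or.inr rfl), hAc, hB0]
        rfl
      · rw [hA1, hB1, if_neg (fun h => absurd h.1 (by omega)),
          if_neg (fun h => by rcases h with h | h <;> omega), hAc, hBc]
        simp only [pvAux]
        by_cases hbad : (c1.getD p ' ' = 'A' ∧ c2.getD q ' ' = 'B') ∨ (c1.getD p ' ' = 'B' ∧ c2.getD q ' ' = 'A') ∨
            (c1.getD p ' ' = 'A' ∧ p < q) ∨ (c1.getD p ' ' = 'B' ∧ q < p)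
        · rw [if_pos hbad]
          split_ifs with h1 h2 h3 h4
          · rfl
          · rfl
          · rfl
          · rfl
          · exact absurd hbad (by tauto)
        · have n1 : ¬(c1.getD p ' ' = 'A' ∧ c2.getD q ' ' = 'B') := fun h => hbad (Or.inl h)
          have n2 : ¬(c1.getD p ' ' = 'B' ∧ c2.getD q ' ' = 'A') := fun h => hbad (Or.inr (Or.inl h))
          have n3 : ¬(c1.getD p ' ' = 'A' ∧ p < q) := fun h => hbad (Or.inr (Or.inr (Or.inl h)))
          have n4 : ¬(c1.getD p ' ' = 'B' ∧ q < p) := fun h => hbad (Or.inr (Or.inr (Or.inr h)))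
          rw [if_neg hbad, if_neg n1, if_neg n2, if_neg n3, if_neg n4]
          exact ih (p+1) (q+1) (by omega) (by omega) (by omega)
    · rw [if_neg hent]
      simp only [pvLoopA]
      rw [if_neg hent]

theorem pvBad_iff (a b : Char) (i j : Int) :
    pvBad a i b j = true ↔
      ((a = 'A' ∧ b = 'B') ∨ (a = 'B' ∧ b = 'A') ∨ (a = 'A' ∧ i < j) ∨ (a = 'B' ∧ j < i)) := by
  unfold pvBad
  split_ifs with h1 h2 h3 h4
  · simp [h1]
  · simp [h2]
  · simp [h3]
  · exact iff_of_true rfl (Or.inr (Or.inr (Or.inr h4)))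
  · refine iff_of_false (by simp) ?_
    rintro (h | h | h | h)
    · exact h1 h
    · exact h2 h
    · exact h3 h
    · exact h4 ⟨h.1, h.2⟩

theorem pvRobsI_hash (ch : Char) (cs : List Char) (t : Nat) (h : ch = '#') :
    pvRobsI (ch :: cs) t = pvRobsI cs (t+1) := by
  simp [pvRobsI, pvRobsN, h]

theorem pvRobsI_cons (ch : Char) (cs : List Char) (t : Nat) (h : ch ≠ '#') :
    pvRobsI (ch :: cs) t = ((t : Int), ch) :: pvRobsI cs (t+1) := by
  simp [pvRobsI, pvRobsN, h]

-- the streaming loop, with pending queues absorbed into the robot lists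
theorem pvLoopB_eq : ∀ (c1 c2 : List Char), c1.length = c2.length →
    ∀ (t : Nat) (p1 p2 : List (Int × Char)), (p1 = [] ∨ p2 = []) →
    pvLoopB c1 c2 (t : Int) p1 p2 = pvCheckI (p1 ++ pvRobsI c1 t) (p2 ++ pvRobsI c2 t) := by
  intro c1
  induction c1 with
  | nil =>
    intro c2 hlen t p1 p2 hinv
    have h2 : c2 = [] := List.length_eq_zero_iff.1 (by simpa using hlen.symm)
    subst h2
    simp only [pvRobsI, pvRobsN, List.map_nil, List.append_nil]
    show (if p1 = [] ∧ p2 = [] then "Yes" else "No") = pvCheckI p1 p2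
    rcases hinv with h | h <;> subst h
    · cases p2 with
      | nil => simp [pvCheckI]
      | cons x xs => simp [pvCheckI]
    · cases p1 with
      | nil => simp [pvCheckI]
      | cons x xs => simp [pvCheckI]
  | cons a r1 ih =>
    intro c2 hlen t p1 p2 hinv
    cases c2 with
    | nil => simp at hlen
    | cons b r2 =>
      have hlen' : r1.length = r2.length := by simpa using hlen
      have hcast : (t : Int) + 1 = ((t + 1 : Nat) : Int) := by push_cast; ring
      by_cases ha : a = '#'
      · have hs1 : pvStep1 a (t : Int) p1 p2 = some (p1, p2) := by simp [pvStep1, ha]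
        rw [pvRobsI_hash a r1 t ha]
        by_cases hb : b = '#'
        · have hs2 : pvStep2 b (t : Int) p1 p2 = some (p1, p2) := by simp [pvStep2, hb]
          simp only [pvLoopB, hs1, hs2]
          rw [hcast, pvRobsI_hash b r2 t hb]
          exact ih r2 hlen' (t+1) p1 p2 hinv
        · rw [pvRobsI_cons b r2 t hb]
          cases p1 with
          | nil =>
            have hs2 : pvStep2 b (t : Int) [] p2 = some ([], p2 ++ [((t : Int), b)]) := by
              simp [pvStep2, hb]
            simp only [pvLoopB, hs1, hs2]
            rw [hcast, ih r2 hlen' (t+1) [] (p2 ++ [((t : Int), b)]) (Or.inl rfl)]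
            simp
          | cons x rest =>
            have hp2 : p2 = [] := hinv.resolve_left (by simp)
            subst hp2
            obtain ⟨i, c⟩ := x
            by_cases hbad : pvBad c i b (t : Int) = true
            · have hs2 : pvStep2 b (t : Int) ((i, c) :: rest) [] = none := by
                simp [pvStep2, hb, hbad]
              simp only [pvLoopB, hs1, hs2]
              show "No" = pvCheckI ((i, c) :: (rest ++ pvRobsI r1 (t+1))) (((t:Int), b) :: pvRobsI r2 (t+1))
              simp [pvCheckI, hbad]
            · have hs2 : pvStep2 b (t : Int) ((i, c) :: rest) [] = some (rest, []) := by
                simp [pvStep2, hb, hbad]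
              simp only [pvLoopB, hs1, hs2]
              rw [hcast, ih r2 hlen' (t+1) rest [] (Or.inr rfl)]
              show pvCheckI (rest ++ pvRobsI r1 (t+1)) ([] ++ pvRobsI r2 (t+1)) =
                pvCheckI ((i, c) :: (rest ++ pvRobsI r1 (t+1))) (((t:Int), b) :: pvRobsI r2 (t+1))
              simp [pvCheckI, hbad]
      · rw [pvRobsI_cons a r1 t ha]
        cases p2 with
        | nil =>
          have hs1 : pvStep1 a (t : Int) p1 [] = some (p1 ++ [((t : Int), a)], []) := by
            simp [pvStep1, ha]
          by_cases hb : b = '#'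
          · have hs2 : pvStep2 b (t : Int) (p1 ++ [((t : Int), a)]) [] =
                some (p1 ++ [((t : Int), a)], []) := by simp [pvStep2, hb]
            simp only [pvLoopB, hs1, hs2]
            rw [hcast, pvRobsI_hash b r2 t hb,
              ih r2 hlen' (t+1) (p1 ++ [((t : Int), a)]) [] (Or.inr rfl)]
            simp
          · rw [pvRobsI_cons b r2 t hb]
            cases p1 with
            | nil =>
              by_cases hbad : pvBad a (t : Int) b (t : Int) = true
              · have hs2 : pvStep2 b (t : Int) ([] ++ [((t : Int), a)]) [] = none := by
                  simp [pvStep2, hb, hbad]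
                simp only [pvLoopB, hs1, hs2]
                show "No" = pvCheckI (((t:Int), a) :: pvRobsI r1 (t+1)) (((t:Int), b) :: pvRobsI r2 (t+1))
                simp [pvCheckI, hbad]
              · have hs2 : pvStep2 b (t : Int) ([] ++ [((t : Int), a)]) [] = some ([], []) := by
                  simp [pvStep2, hb, hbad]
                simp only [pvLoopB, hs1, hs2]
                rw [hcast, ih r2 hlen' (t+1) [] [] (Or.inl rfl)]
                show pvCheckI ([] ++ pvRobsI r1 (t+1)) ([] ++ pvRobsI r2 (t+1)) =
                  pvCheckI (((t:Int), a) :: pvRobsI r1 (t+1)) (((t:Int), b) :: pvRobsI r2 (t+1))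
                simp [pvCheckI, hbad]
            | cons x rest =>
              obtain ⟨i, c⟩ := x
              by_cases hbad : pvBad c i b (t : Int) = true
              · have hs2 : pvStep2 b (t : Int) (((i, c) :: rest) ++ [((t : Int), a)]) [] = none := by
                  simp [pvStep2, hb, hbad]
                simp only [pvLoopB, hs1, hs2]
                show "No" = pvCheckI ((i, c) :: (rest ++ ((t:Int), a) :: pvRobsI r1 (t+1))) (((t:Int), b) :: pvRobsI r2 (t+1))
                simp [pvCheckI, hbad]
              · have hs2 : pvStep2 b (t : Int) (((i, c) :: rest) ++ [((t : Int), a)]) [] =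
                    some (rest ++ [((t : Int), a)], []) := by simp [pvStep2, hb, hbad]
                simp only [pvLoopB, hs1, hs2]
                rw [hcast, ih r2 hlen' (t+1) (rest ++ [((t : Int), a)]) [] (Or.inr rfl)]
                show pvCheckI ((rest ++ [((t:Int), a)]) ++ pvRobsI r1 (t+1)) ([] ++ pvRobsI r2 (t+1)) =
                  pvCheckI ((i, c) :: (rest ++ ((t:Int), a) :: pvRobsI r1 (t+1))) (((t:Int), b) :: pvRobsI r2 (t+1))
                simp [pvCheckI, hbad]
        | cons y rest2 =>
          have hp1 : p1 = [] := hinv.resolve_right (by simp)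
          subst hp1
          obtain ⟨j, c⟩ := y
          by_cases hbad : pvBad a (t : Int) c j = true
          · have hs1 : pvStep1 a (t : Int) [] ((j, c) :: rest2) = none := by
              simp [pvStep1, ha, hbad]
            simp only [pvLoopB, hs1]
            show "No" = pvCheckI (((t:Int), a) :: pvRobsI r1 (t+1)) ((j, c) :: (rest2 ++ pvRobsI (b :: r2) t))
            simp [pvCheckI, hbad]
          · have hs1 : pvStep1 a (t : Int) [] ((j, c) :: rest2) = some ([], rest2) := by
              simp [pvStep1, ha, hbad]
            by_cases hb : b = '#'
            · have hs2 : pvStep2 b (t : Int) [] rest2 = some ([], rest2) := by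
                simp [pvStep2, hb]
              simp only [pvLoopB, hs1, hs2]
              rw [hcast, pvRobsI_hash b r2 t hb, ih r2 hlen' (t+1) [] rest2 (Or.inl rfl)]
              show pvCheckI ([] ++ pvRobsI r1 (t+1)) (rest2 ++ pvRobsI r2 (t+1)) =
                pvCheckI (((t:Int), a) :: pvRobsI r1 (t+1)) ((j, c) :: (rest2 ++ pvRobsI r2 (t+1)))
              simp [pvCheckI, hbad]
            · have hs2 : pvStep2 b (t : Int) [] rest2 = some ([], rest2 ++ [((t : Int), b)]) := by
                simp [pvStep2, hb]
              simp only [pvLoopB, hs1, hs2]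
              rw [pvRobsI_cons b r2 t hb, hcast,
                ih r2 hlen' (t+1) [] (rest2 ++ [((t : Int), b)]) (Or.inl rfl)]
              show pvCheckI ([] ++ pvRobsI r1 (t+1)) ((rest2 ++ [((t:Int), b)]) ++ pvRobsI r2 (t+1)) =
                pvCheckI (((t:Int), a) :: pvRobsI r1 (t+1)) ((j, c) :: (rest2 ++ ((t:Int), b) :: pvRobsI r2 (t+1)))
              simp [pvCheckI, hbad]

theorem pvCheckI_cast : ∀ (ra rb : List (Nat × Char)),
    pvCheckI (ra.map (fun p => ((p.1 : Int), p.2))) (rb.map (fun p => ((p.1 : Int), p.2))) =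
      if ra.length = rb.length then pvNatZip ra rb else "No" := by
  intro ra
  induction ra with
  | nil =>
    intro rb
    cases rb with
    | nil => simp [pvCheckI, pvNatZip]
    | cons y t => simp [pvCheckI]
  | cons hd1 ra ih =>
    intro rb
    cases rb with
    | nil => simp [pvCheckI]
    | cons hd2 rb =>
      obtain ⟨p, a⟩ := hd1
      obtain ⟨q, b⟩ := hd2
      simp only [List.map_cons, pvCheckI, pvNatZip]
      by_cases hbad : (a = 'A' ∧ b = 'B') ∨ (a = 'B' ∧ b = 'A') ∨ (a = 'A' ∧ p < q) ∨ (a = 'B' ∧ q < p)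
      · have hB : pvBad a (p : Int) b (q : Int) = true := by
          rw [pvBad_iff]
          rcases hbad with h | h | h | h
          · exact Or.inl h
          · exact Or.inr (Or.inl h)
          · exact Or.inr (Or.inr (Or.inl ⟨h.1, by exact_mod_cast h.2⟩))
          · exact Or.inr (Or.inr (Or.inr ⟨h.1, by exact_mod_cast h.2⟩))
        rw [if_pos hB, if_pos hbad]
        split_ifs <;> rfl
      · have hB : pvBad a (p : Int) b (q : Int) = false := by
          rw [Bool.eq_false_iff]
          intro h
          rcases (pvBad_iff a b (p : Int) (q : Int)).1 h with h | h | h | h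
          · exact hbad (Or.inl h)
          · exact hbad (Or.inr (Or.inl h))
          · exact hbad (Or.inr (Or.inr (Or.inl ⟨h.1, by exact_mod_cast h.2⟩)))
          · exact hbad (Or.inr (Or.inr (Or.inr ⟨h.1, by exact_mod_cast h.2⟩)))
        rw [if_neg (by simp [hB]), if_neg hbad, ih rb]
        by_cases hlen : ra.length = rb.length
        · rw [if_pos hlen, if_pos (by simp [hlen])]
        · rw [if_neg hlen, if_neg (by simp [hlen])]

-- B's characterization on equal-length inputs
theorem pvAlt_char (s1 s2 : String) (hl : s1.toList.length = s2.toList.length) :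
    moveRobots_alt s1 s2 =
      if (pvRobsN s1.toList 0).length = (pvRobsN s2.toList 0).length then
        pvNatZip (pvRobsN s1.toList 0) (pvRobsN s2.toList 0) else "No" := by
  simp only [moveRobots_alt]
  rw [if_neg (not_not_intro hl)]
  have h0 : (0 : Int) = ((0 : Nat) : Int) := by simp
  rw [h0, pvLoopB_eq s1.toList s2.toList hl 0 [] [] (Or.inl rfl)]
  simp only [List.nil_append]
  exact pvCheckI_cast (pvRobsN s1.toList 0) (pvRobsN s2.toList 0)

theorem pvRobs_eq : ∀ (cs : List Char) (k : Nat),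
    (cs.zipIdx k).filter (fun x => x.1 ≠ '#') = (pvRobsN cs k).map Prod.swap := by
  intro cs
  induction cs with
  | nil => intro k; simp [pvRobsN]
  | cons ch cs ih =>
    intro k
    rw [List.zipIdx_cons]
    by_cases hch : ch = '#'
    · subst hch
      rw [List.filter_cons_of_neg (by simp)]
      simp only [pvRobsN]
      exact ih (k+1)
    · rw [List.filter_cons_of_pos (by simp [hch])]
      simp only [pvRobsN, if_neg hch, List.map_cons]
      rw [ih (k+1)]
      rfl

theorem pvRobs_eq0 (s : String) : pvRobs s = (pvRobsN s.toList 0).map Prod.swap := by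
  unfold pvRobs
  exact pvRobs_eq s.toList 0

theorem pvGoodSwap (i j : Nat) (a b : Char) :
    ((a = 'A' → b ≠ 'B' ∧ j ≤ i) ∧ (a = 'B' → b ≠ 'A' ∧ i ≤ j)) ↔ pvGoodN (i, a) (j, b) := by
  unfold pvGoodN
  constructor
  · rintro ⟨hA, hB⟩ (⟨h1, h2⟩ | ⟨h1, h2⟩ | ⟨h1, h2⟩ | ⟨h1, h2⟩)
    · exact (hA h1).1 h2
    · exact (hB h1).1 h2
    · have := (hA h1).2; omega
    · have := (hB h1).2; omega
  · intro hg
    constructor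
    · intro ha
      refine ⟨fun hb => hg (Or.inl ⟨ha, hb⟩), ?_⟩
      by_contra h
      exact hg (Or.inr (Or.inr (Or.inl ⟨ha, by omega⟩)))
    · intro hb
      refine ⟨fun hb2 => hg (Or.inr (Or.inl ⟨hb, hb2⟩)), ?_⟩
      by_contra h
      exact hg (Or.inr (Or.inr (Or.inr ⟨hb, by omega⟩)))

theorem pvRobsN_last : ∀ (c : List Char) (k : Nat), c ≠ [] →
    (c.getLast? ≠ some '#' ↔ ∃ x, (pvRobsN c k).getLast? = some x ∧ x.1 + 1 = k + c.length) := by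
  intro c
  induction c with
  | nil => intro k h; exact absurd rfl h
  | cons ch cs ih =>
    intro k _
    cases cs with
    | nil =>
      by_cases hch : ch = '#'
      · subst hch
        simp [pvRobsN]
      · simp only [pvRobsN, if_neg hch]
        refine iff_of_true (by simp [hch]) ⟨(k, ch), by simp, by simp⟩
    | cons d t =>
      rw [List.getLast?_cons_cons]
      by_cases hch : ch = '#'
      · rw [show pvRobsN (ch :: d :: t) k = pvRobsN (d :: t) (k+1) by simp [pvRobsN, hch]]
        rw [ih (k+1) (by simp)]
        constructor <;> rintro ⟨x, hx, hn⟩ <;>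
          exact ⟨x, hx, by simp only [List.length_cons] at hn ⊢; omega⟩
      · rw [show pvRobsN (ch :: d :: t) k = (k, ch) :: pvRobsN (d :: t) (k+1) by
          simp [pvRobsN, hch]]
        cases hR : pvRobsN (d :: t) (k+1) with
        | nil =>
          have hfalse : ¬ (d :: t).getLast? ≠ some '#' := by
            rw [ih (k+1) (by simp), hR]
            rintro ⟨x, hx, _⟩
            simp at hx
          refine iff_of_false hfalse ?_
          rintro ⟨x, hx, hn⟩
          simp only [List.getLast?_singleton, Option.some_inj] at hx
          subst hx
          simp only [List.length_cons] at hn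
          omega
        | cons y ys =>
          rw [List.getLast?_cons_cons, ← hR, ih (k+1) (by simp), hR]
          constructor <;> rintro ⟨x, hx, hn⟩ <;>
            exact ⟨x, hx, by simp only [List.length_cons] at hn ⊢; omega⟩

theorem pvD_iff (s1 s2 : String) :
    D_moveRobots s1 s2 ↔ (s1.toList.length = s2.toList.length ∧
      pvDc (pvRobsN s1.toList 0) (pvRobsN s2.toList 0) s1.toList.length) := by
  unfold pvDc
  simp only [D_moveRobots, pvRobs_eq0, List.zip_map, List.length_map]
  constructor
  · rintro ⟨hl, hne, hend, hall⟩
    refine ⟨hl, ?_, ?_⟩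
    · intro pr hpr
      obtain ⟨⟨i, a⟩, ⟨j, b⟩⟩ := pr
      exact (pvGoodSwap i j a b).1 (hall _ (List.mem_map_of_mem hpr))
    · by_cases hlt : (pvRobsN s1.toList 0).length < (pvRobsN s2.toList 0).length
      · rw [if_pos hlt] at hend
        have hne1 : s1.toList ≠ [] := by
          intro h
          rw [h] at hl
          simp only [List.length_nil] at hl
          have h2 : s2.toList = [] := List.length_eq_zero_iff.1 hl.symm
          rw [h, h2] at hlt
          simp [pvRobsN] at hlt
        obtain ⟨x, hx, hn⟩ := (pvRobsN_last s1.toList 0 hne1).1 hend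
        exact Or.inl ⟨hlt, x, hx, by omega⟩
      · rw [if_neg hlt] at hend
        have hlt2 : (pvRobsN s2.toList 0).length < (pvRobsN s1.toList 0).length := by omega
        have hne2 : s2.toList ≠ [] := by
          intro h
          rw [h] at hl
          simp only [List.length_nil] at hl
          have h1 : s1.toList = [] := List.length_eq_zero_iff.1 hl
          rw [h, h1] at hlt2
          simp [pvRobsN] at hlt2
        obtain ⟨x, hx, hn⟩ := (pvRobsN_last s2.toList 0 hne2).1 hend
        exact Or.inr ⟨hlt2, x, hx, by omega⟩
  · rintro ⟨hl, hg, hrest⟩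
    refine ⟨hl, ?_, ?_, ?_⟩
    · rcases hrest with ⟨hlt, _⟩ | ⟨hlt, _⟩ <;> omega
    · rcases hrest with ⟨hlt, x, hx, hn⟩ | ⟨hlt, x, hx, hn⟩
      · rw [if_pos hlt]
        have hne1 : s1.toList ≠ [] := by
          intro h
          rw [h] at hx
          simp [pvRobsN] at hx
        exact (pvRobsN_last s1.toList 0 hne1).2 ⟨x, hx, by omega⟩
      · rw [if_neg (by omega)]
        have hne2 : s2.toList ≠ [] := by
          intro h
          rw [h] at hx
          simp [pvRobsN] at hx
        exact (pvRobsN_last s2.toList 0 hne2).2 ⟨x, hx, by omega⟩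
    · intro x hx
      rcases List.mem_map.1 hx with ⟨pr, hpr, rfl⟩
      obtain ⟨⟨i, a⟩, ⟨j, b⟩⟩ := pr
      exact (pvGoodSwap i j a b).2 (hg _ hpr)

theorem pvAux_yes (n : Nat) : ∀ (ra rb : List (Nat × Char)), pvDc ra rb n → pvAux ra rb n n = "Yes" := by
  intro ra
  induction ra with
  | nil =>
    intro rb hdc
    rcases hdc.2 with ⟨_, x, hx, _⟩ | ⟨hlt, _⟩
    · simp at hx
    · simp at hlt
  | cons hd1 ra ih =>
    intro rb hdc
    cases rb with
    | nil =>
      rcases hdc.2 with ⟨hlt, _⟩ | ⟨_, x, hx, _⟩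
      · simp at hlt
      · simp at hx
    | cons hd2 rb =>
      obtain ⟨p, a⟩ := hd1
      obtain ⟨q, b⟩ := hd2
      obtain ⟨hg, hrest⟩ := hdc
      have hgood : ¬((a = 'A' ∧ b = 'B') ∨ (a = 'B' ∧ b = 'A') ∨ (a = 'A' ∧ p < q) ∨ (a = 'B' ∧ q < p)) :=
        hg ((p, a), (q, b)) (by simp [List.zip_cons_cons])
      simp only [pvAux]
      rw [if_neg hgood]
      by_cases hcont : p + 1 < n ∧ q + 1 < n
      · rw [if_pos hcont]
        apply ih
        refine ⟨fun pr hpr => hg pr (by simp [List.zip_cons_cons, hpr]), ?_⟩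
        rcases hrest with ⟨hlt, x, hx, hxn⟩ | ⟨hlt, x, hx, hxn⟩
        · have hra : ra ≠ [] := by
            intro h; subst h
            simp only [List.getLast?_singleton, Option.some_inj] at hx
            subst hx
            exact absurd hcont.1 (by omega)
          refine Or.inl ⟨by simp only [List.length_cons] at hlt ⊢; omega, x, ?_, hxn⟩
          cases ra with
          | nil => exact absurd rfl hra
          | cons y t => simpa [List.getLast?_cons_cons] using hx
        · have hrb : rb ≠ [] := by
            intro h; subst h
            simp only [List.getLast?_singleton, Option.some_inj] at hx
            subst hx
            exact absurd hcont.2 (by omega)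
          refine Or.inr ⟨by simp only [List.length_cons] at hlt ⊢; omega, x, ?_, hxn⟩
          cases rb with
          | nil => exact absurd rfl hrb
          | cons y t => simpa [List.getLast?_cons_cons] using hx
      · rw [if_neg hcont]

theorem pvAux_vs (n : Nat) : ∀ (ra rb : List (Nat × Char)),
    (∀ x ∈ ra, x.1 < n) → (∀ x ∈ rb, x.1 < n) →
    ra.Pairwise (fun x y => x.1 < y.1) → rb.Pairwise (fun x y => x.1 < y.1) →
    ¬ pvDc ra rb n →
    pvAux ra rb n n = if ra.length = rb.length then pvNatZip ra rb else "No" := by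
  intro ra
  induction ra with
  | nil =>
    intro rb _ _ _ _ _
    cases rb with
    | nil => simp [pvAux, pvNatZip]
    | cons hd rb =>
      rw [if_neg (by simp)]
      rfl
  | cons hd1 ra ih =>
    intro rb hb1 hb2 hp1 hp2 hnd
    cases rb with
    | nil =>
      rw [if_neg (by simp)]
      rfl
    | cons hd2 rb =>
      obtain ⟨p, a⟩ := hd1
      obtain ⟨q, b⟩ := hd2
      simp only [pvAux, pvNatZip]
      by_cases hbad : (a = 'A' ∧ b = 'B') ∨ (a = 'B' ∧ b = 'A') ∨ (a = 'A' ∧ p < q) ∨ (a = 'B' ∧ q < p)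
      · rw [if_pos hbad]
        split_ifs <;> rfl
      · rw [if_neg hbad]
        have hpn : p < n := hb1 (p, a) List.mem_cons_self
        have hqn : q < n := hb2 (q, b) List.mem_cons_self
        by_cases hcont : p + 1 < n ∧ q + 1 < n
        · rw [if_pos hcont]
          have hnd' : ¬ pvDc ra rb n := by
            rintro ⟨hg', hrest'⟩
            apply hnd
            refine ⟨?_, ?_⟩
            · intro pr hpr
              rw [List.zip_cons_cons, List.mem_cons] at hpr
              rcases hpr with h | h
              · subst h; exact hbad
              · exact hg' pr h
            · rcases hrest' with ⟨hlt, x, hx, hxn⟩ | ⟨hlt, x, hx, hxn⟩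
              · have hra : ra ≠ [] := by intro h; subst h; simp at hx
                refine Or.inl ⟨by simp only [List.length_cons]; omega, x, ?_, hxn⟩
                cases ra with
                | nil => exact absurd rfl hra
                | cons y t => simpa [List.getLast?_cons_cons] using hx
              · have hrb : rb ≠ [] := by intro h; subst h; simp at hx
                refine Or.inr ⟨by simp only [List.length_cons]; omega, x, ?_, hxn⟩
                cases rb with
                | nil => exact absurd rfl hrb
                | cons y t => simpa [List.getLast?_cons_cons] using hx
          rw [ih rb (fun x hx => hb1 x (List.mem_cons_of_mem _ hx))
            (fun x hx => hb2 x (List.mem_cons_of_mem _ hx)) (List.Pairwise.of_cons hp1)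
            (List.Pairwise.of_cons hp2) hnd']
          by_cases hlen : ra.length = rb.length
          · rw [if_pos hlen, if_pos (by simp [hlen]), if_neg hbad]
          · rw [if_neg hlen, if_neg (by simp [hlen])]
        · rw [if_neg hcont]
          have hor : p + 1 = n ∨ q + 1 = n := by omega
          rcases hor with hpe | hqe
          · have hra : ra = [] := by
              cases ra with
              | nil => rfl
              | cons y t =>
                have h1 : p < y.1 := (List.pairwise_cons.1 hp1).1 y List.mem_cons_self
                have h2 : y.1 < n := hb1 y (List.mem_cons_of_mem _ List.mem_cons_self)
                omega
            subst hra
            cases rb with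
            | nil =>
              rw [if_pos (by simp), if_neg hbad]
              rfl
            | cons y t =>
              exfalso
              apply hnd
              refine ⟨?_, Or.inl ⟨by simp only [List.length_cons, List.length_nil]; omega,
                (p, a), List.getLast?_singleton, hpe⟩⟩
              intro pr hpr
              simp only [List.zip_cons_cons, List.zip_nil_left, List.mem_cons,
                List.not_mem_nil, or_false] at hpr
              subst hpr
              exact hbad
          · have hrb : rb = [] := by
              cases rb with
              | nil => rfl
              | cons y t =>
                have h1 : q < y.1 := (List.pairwise_cons.1 hp2).1 y List.mem_cons_self
                have h2 : y.1 < n := hb2 y (List.mem_cons_of_mem _ List.mem_cons_self)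
                omega
            subst hrb
            cases ra with
            | nil =>
              rw [if_pos (by simp), if_neg hbad]
              rfl
            | cons y t =>
              exfalso
              apply hnd
              refine ⟨?_, Or.inr ⟨by simp only [List.length_cons, List.length_nil]; omega,
                (q, b), List.getLast?_singleton, hqe⟩⟩
              intro pr hpr
              simp only [List.zip_cons_cons, List.zip_nil_right, List.mem_cons,
                List.not_mem_nil, or_false] at hpr
              subst hpr
              exact hbad

theorem pvRF_zero (c : List Char) : pvRF c 0 = pvRobsN c 0 := by
  unfold pvRF
  rw [List.drop_zero]

-- ===== VERDICT (by name: the statement is the Claim_ definition above) =====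
theorem moveRobots_spec : Claim_unchanged_moveRobots := by
  intro s1 s2 _ hnd
  show moveRobots s1 s2 = moveRobots_alt s1 s2
  by_cases hl : s1.toList.length = s2.toList.length
  · rw [pvAlt_char s1 s2 hl]
    simp only [moveRobots]
    rw [if_neg (not_not_intro hl)]
    rw [pvLoopA_eq s1.toList s2.toList (s1.toList.length + 1) 0 0 (by omega) (by omega) (by omega)]
    by_cases hn : 0 < s1.toList.length
    · rw [if_pos ⟨hn, by omega⟩, pvRF_zero, pvRF_zero]
      have hnd' : ¬ pvDc (pvRobsN s1.toList 0) (pvRobsN s2.toList 0) s1.toList.length :=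
        fun h => hnd ((pvD_iff s1 s2).2 ⟨hl, h⟩)
      have heq : s2.toList.length = s1.toList.length := hl.symm
      rw [heq]
      exact pvAux_vs s1.toList.length (pvRobsN s1.toList 0) (pvRobsN s2.toList 0)
        (fun x hx => by have := pvRobsN_mem s1.toList 0 x hx; omega)
        (fun x hx => by have := pvRobsN_mem s2.toList 0 x hx; omega)
        (pvRobsN_pairwise s1.toList 0) (pvRobsN_pairwise s2.toList 0) hnd'
    · have h1 : s1.toList = [] := List.length_eq_zero_iff.1 (by omega)
      have h2 : s2.toList = [] := List.length_eq_zero_iff.1 (by omega)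
      rw [h1, h2]
      rw [if_neg (by simp)]
      simp [pvRobsN, pvNatZip]
  · simp only [moveRobots, moveRobots_alt]
    rw [if_pos hl, if_pos hl]

theorem moveRobots_changed : Claim_changed_moveRobots := by
  unfold Claim_changed_moveRobots; decide

theorem moveRobots_tight : Claim_exact_moveRobots := by
  intro s1 s2 _ hd
  obtain ⟨hl, hdc⟩ := (pvD_iff s1 s2).1 hd
  have hlen : (pvRobsN s1.toList 0).length ≠ (pvRobsN s2.toList 0).length := by
    rcases hdc.2 with ⟨hlt, _⟩ | ⟨hlt, _⟩ <;> omega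
  have hn : 0 < s1.toList.length := by
    rcases hdc.2 with ⟨_, x, _, hxn⟩ | ⟨_, x, _, hxn⟩ <;> omega
  have hA : moveRobots s1 s2 = "Yes" := by
    simp only [moveRobots]
    rw [if_neg (not_not_intro hl)]
    rw [pvLoopA_eq s1.toList s2.toList (s1.toList.length + 1) 0 0 (by omega) (by omega) (by omega)]
    rw [if_pos ⟨hn, by omega⟩, pvRF_zero, pvRF_zero]
    have heq : s2.toList.length = s1.toList.length := hl.symm
    rw [heq]
    exact pvAux_yes s1.toList.length (pvRobsN s1.toList 0) (pvRobsN s2.toList 0) hdc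
  have hB : moveRobots_alt s1 s2 = "No" := by
    rw [pvAlt_char s1 s2 hl, if_neg hlen]
  rw [hA, hB]
  decide
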